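-- pv_equiv track=rewrite | github.com/antrianis/bugfree-computing-machine | cw/rank_vector.py | ranks
-- ===== SOURCE A (Python) =====
-- from operator import itemgetter
--
-- def ranks(a):
--     if not len(a):
--         return []
--     r = [0] * len(a)
--
--     indices, a_sorted = zip(*sorted(enumerate(a), key=itemgetter(1),
--                                     reverse=True))
--     current_rank, total_rank = 1, 1
--     pre = a_sorted[0]
--     for i, e in zip(indices, a_sorted):
--         if pre != e:
--             current_rank = total_rank
--         r[i] = current_rank
--         total_rank += 1
--         pre = e
--     return r
-- ===== SOURCE B (Python) =====
-- def ranks(a):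
--     return [1 + sum(x > e for x in a) for e in a]
-- ===== Notes on version B (the rewrite author's own statement) =====
-- stated objective: simpler
-- what changed: Replaced the stable descending sort plus rank-assignment loop with the direct definition: each element's competition rank is 1 plus the number of strictly greater elements, computed by a nested comprehension.
import Mathlib
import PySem

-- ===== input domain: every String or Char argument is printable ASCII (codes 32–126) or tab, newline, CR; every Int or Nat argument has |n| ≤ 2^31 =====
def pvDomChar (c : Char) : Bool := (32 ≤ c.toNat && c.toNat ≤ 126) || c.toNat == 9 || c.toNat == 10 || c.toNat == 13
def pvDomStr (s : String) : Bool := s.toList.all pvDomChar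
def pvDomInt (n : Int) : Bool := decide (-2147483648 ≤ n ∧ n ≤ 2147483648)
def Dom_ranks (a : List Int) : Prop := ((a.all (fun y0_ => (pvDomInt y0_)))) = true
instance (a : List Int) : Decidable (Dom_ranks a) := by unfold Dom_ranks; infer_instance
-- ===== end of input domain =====

-- B replaces A's stable descending sort + rank-assignment sweep by the direct
-- definition (rank = 1 + number of strictly greater elements): simpler, not faster.

-- ===== PORT A =====
-- the for-loop over zip(indices, a_sorted) with state (current_rank, total_rank, pre, r)
def ranksLoop (s : List (Int × Int)) (cur tot pre : Int) (r : List Int) : List Int :=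
  match s with
  | [] => r
  | (i, e) :: rest =>
      let cur' := if pre ≠ e then tot else cur
      ranksLoop rest cur' (tot + 1) e (PySem.List.pySetD r i cur')

def ranks (a : List Int) : List Int :=
  if a.length = 0 then []
  else
    let r := List.replicate a.length 0
    -- sorted(enumerate(a), key=itemgetter(1), reverse=True); the zip(*...) unpack
    -- followed by zip(indices, a_sorted) re-forms exactly this pair list
    match PySem.List.sorted (PySem.List.enumerate a) (fun p => p.2) true with
    | [] => []  -- unreachable: a is nonempty (Python would raise on the unpack)
    | (i0, e0) :: rest => ranksLoop ((i0, e0) :: rest) 1 1 e0 r  -- pre = a_sorted[0]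

-- ===== PORT B =====
def ranks_alt (a : List Int) : List Int :=
  a.map (fun e => 1 + (a.countP (fun x => decide (e < x)) : Int))

-- ===== PRECONDITION & SPEC =====
def Spec_ranks (a : List Int) (out : List Int) : Prop := out = ranks_alt a
instance (a : List Int) (out : List Int) : Decidable (Spec_ranks a out) := by unfold Spec_ranks; infer_instance

-- ===== CLAIM (what is proved, stated in full; the proofs are below) =====
def Claim_equal_ranks : Prop := ∀ (a : List Int), Dom_ranks a → Spec_ranks a (ranks a)

-- ===== LEMMAS AND PROOFS =====

theorem length_ranksLoop (s : List (Int × Int)) (cur tot pre : Int) (r : List Int) :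
    (ranksLoop s cur tot pre r).length = r.length := by
  induction s generalizing cur tot pre r with
  | nil => rfl
  | cons p rest ih =>
      obtain ⟨i, e⟩ := p
      simp [ranksLoop, ih, PySem.List.length_pySetD]

-- Main invariant lemma: the loop writes 1 + #{x ∈ a | x > a[j]} at every index j
-- listed in s, and leaves all other entries of r alone.
theorem ranksLoop_get (a : List Int) (s : List (Int × Int)) (P : List Int)
    (cur tot pre : Int) (r : List Int) (j : Nat) (hj : j < a.length)
    (hr : r.length = a.length)
    (hdesc : s.Pairwise (fun p q => q.2 ≤ p.2))
    (hnd : (s.map Prod.fst).Nodup)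
    (hmem : ∀ p ∈ s, ∃ (k : Nat) (h : k < a.length), p = ((k : Int), a[k]))
    (hle : ∀ p ∈ s, p.2 ≤ pre)
    (hP : ∀ x ∈ P, pre ≤ x)
    (hperm : (P ++ s.map Prod.snd).Perm a)
    (hcur : cur = 1 + (a.countP (fun x => decide (pre < x)) : Int))
    (htot : tot = 1 + (P.length : Int)) :
    (ranksLoop s cur tot pre r)[j]? =
      if ∃ p ∈ s, p.1 = (j : Int)
      then some (1 + (a.countP (fun x => decide (a[j] < x)) : Int))
      else r[j]? := by
  induction s generalizing P cur tot pre r with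
  | nil => simp [ranksLoop]
  | cons p rest ih =>
      obtain ⟨i, e⟩ := p
      obtain ⟨k, hk, hkeq⟩ := hmem (i, e) (List.mem_cons_self ..)
      obtain ⟨hik, hek⟩ := Prod.mk.injEq .. ▸ hkeq
      have hepre : e ≤ pre := hle (i, e) (List.mem_cons_self ..)
      -- the updated current_rank is 1 + #{x ∈ a | x > e}
      have hcur' : (if pre ≠ e then tot else cur)
          = 1 + (a.countP (fun x => decide (e < x)) : Int) := by
        by_cases hpe : pre = e
        · simp [hpe] at hcur ⊢; omega
        · have helt : e < pre := lt_of_le_of_ne hepre (fun h => hpe h.symm)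
          have : a.countP (fun x => decide (e < x)) = P.length := by
            have h1 : (P ++ (((i, e) :: rest).map Prod.snd)).countP
                (fun x => decide (e < x)) = a.countP (fun x => decide (e < x)) :=
              hperm.countP_eq _
            have h2 : P.countP (fun x => decide (e < x)) = P.length :=
              List.countP_eq_length.mpr (fun x hx => by
                have := hP x hx; simp; omega)
            have h3 : (((i, e) :: rest).map Prod.snd).countP
                (fun x => decide (e < x)) = 0 := by
              apply List.countP_eq_zero.mpr
              intro x hx
              simp only [List.map_cons, List.mem_cons] at hx
              rcases hx with hx | hx
              · simp [hx]
              · obtain ⟨q, hq, hqx⟩ := List.mem_map.mp hx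
                have : q.2 ≤ e := (List.pairwise_cons.mp hdesc).1 q hq
                simp; omega
            rw [List.countP_append, h2, h3] at h1
            omega
          simp only [ne_eq, hpe, not_false_iff, if_true, htot, this]
      rw [ranksLoop]
      have hrest := ih (P ++ [e]) (if pre ≠ e then tot else cur) (tot + 1) e
        (PySem.List.pySetD r i (if pre ≠ e then tot else cur))
        (by rw [PySem.List.length_pySetD, hr])
        (List.pairwise_cons.mp hdesc).2
        (by simpa using hnd.of_cons)
        (fun q hq => hmem q (List.mem_cons_of_mem _ hq))
        (fun q hq => (List.pairwise_cons.mp hdesc).1 q hq)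
        (by intro x hx
            rcases List.mem_append.mp hx with hx | hx
            · exact le_trans hepre (hP x hx)
            · simp at hx; omega)
        (by have : ((P ++ [e]) ++ rest.map Prod.snd).Perm
              (P ++ (((i, e) :: rest).map Prod.snd)) := by
              simp [List.append_assoc]
            exact this.trans hperm)
        hcur'
        (by simp [htot]; omega)
      rw [hrest]
      have hset : PySem.List.pySetD r i (if pre ≠ e then tot else cur)
          = r.set k (if pre ≠ e then tot else cur) := by
        rw [hik, PySem.List.pySetD_natCast]
      by_cases hjk : k = j
      · -- the head pair writes index j; no later pair touches it (indices are Nodup)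
        have hno : ¬ ∃ p ∈ rest, p.1 = (j : Int) := by
          rintro ⟨q, hq, hq1⟩
          have : i ∈ rest.map Prod.fst := List.mem_map.mpr ⟨q, hq, by omega⟩
          exact (List.nodup_cons.mp hnd).1 this
        have hyes : ∃ p ∈ (i, e) :: rest, p.1 = (j : Int) :=
          ⟨(i, e), List.mem_cons_self .., by omega⟩
        rw [if_pos hyes, if_neg hno, hset, hjk,
          List.getElem?_set_self (by omega), hcur']
        subst hjk; simp [hek]
      · have hiff : (∃ p ∈ (i, e) :: rest, p.1 = (j : Int)) ↔
            (∃ p ∈ rest, p.1 = (j : Int)) := by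
          constructor
          · rintro ⟨q, hq, hq1⟩
            rcases List.mem_cons.mp hq with rfl | hq'
            · exfalso; apply hjk; omega
            · exact ⟨q, hq', hq1⟩
          · rintro ⟨q, hq, hq1⟩; exact ⟨q, List.mem_cons_of_mem _ hq, hq1⟩
        by_cases hq : ∃ p ∈ rest, p.1 = (j : Int)
        · rw [if_pos hq, if_pos (hiff.mpr hq)]
        · rw [if_neg hq, if_neg (fun h => hq (hiff.mp h)), hset,
            List.getElem?_set_ne (by omega)]

-- ===== VERDICT (by name: the statement is the Claim_ definition above) =====
theorem ranks_spec : Claim_equal_ranks := by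
  unfold Claim_equal_ranks
  intro b _
  unfold Spec_ranks
  by_cases hbne : b = []
  · subst hbne; rfl
  rw [ranks, if_neg (by simpa using hbne)]
  have hne : PySem.List.enumerate b ≠ [] := by
    intro h
    have := congrArg List.length h
    simp [PySem.List.length_enumerate] at this
    exact hbne this
  obtain ⟨⟨i0, e0⟩, rest, hss⟩ :
      ∃ p t, PySem.List.sorted (PySem.List.enumerate b) (fun p => p.2) true = p :: t := by
    rcases h : PySem.List.sorted (PySem.List.enumerate b) (fun p => p.2) true with _ | ⟨p, t⟩
    · exact absurd ((PySem.List.sorted_eq_nil_iff _ _ _).mp h) hne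
    · exact ⟨p, t, rfl⟩
  rw [hss]
  have hperm : ((i0, e0) :: rest).Perm (PySem.List.enumerate b) :=
    hss ▸ PySem.List.sorted_perm ..
  have hmax : ∀ p ∈ PySem.List.enumerate b, p.2 ≤ e0 :=
    PySem.List.key_head_sorted_rev_ge (PySem.List.enumerate b) (fun p => p.2) hss
  have hsnd : (((i0, e0) :: rest).map Prod.snd).Perm b := by
    have := hperm.map Prod.snd
    rwa [PySem.List.map_snd_enumerate] at this
  apply List.ext_getElem?
  intro j
  by_cases hj : j < b.length
  · have hjmem : ((j : Int), b[j]) ∈ (i0, e0) :: rest :=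
      hperm.mem_iff.mpr ((PySem.List.mem_enumerate_iff _ _ _).mpr ⟨j, hj, by rw [zero_add]⟩)
    rw [ranksLoop_get b _ [] 1 1 e0 _ j hj (by simp)
        (hss ▸ PySem.List.sorted_pairwise_rev ..)
        ((hperm.map Prod.fst).nodup_iff.mpr
          (((PySem.List.pairwise_lt_enumerate b 0).map Prod.fst
            (fun p q hpq => ne_of_lt hpq))))
        (fun p hp => by
          obtain ⟨k, hk, hpk⟩ :=
            (PySem.List.mem_enumerate_iff _ _ _).mp (hperm.mem_iff.mp hp)
          exact ⟨k, hk, by simpa using hpk⟩)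
        (fun p hp => hmax p (hperm.mem_iff.mp hp))
        (by simp)
        (by simpa using hsnd)
        (by have : b.countP (fun x => decide (e0 < x)) = 0 := by
              apply List.countP_eq_zero.mpr
              intro x hx
              obtain ⟨k, hk, hkx⟩ := List.getElem_of_mem hx
              have := hmax ((k : Int), x)
                ((PySem.List.mem_enumerate_iff _ _ _).mpr ⟨k, hk, by simp [hkx]⟩)
              simp at this ⊢; omega
            simp [this])
        rfl,
      if_pos ⟨((j : Int), b[j]), hjmem, rfl⟩]
    simp [ranks_alt, hj]
  · rw [List.getElem?_eq_none (by rw [length_ranksLoop]; simp; omega),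
      List.getElem?_eq_none (by simp [ranks_alt]; omega)]
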